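-- pv_equiv track=rewrite | github.com/Hochfrequenz/kohlrahbi | src/kohlrahbi/table_header.py | create_mapping_of_tabstop_positions
-- ===== SOURCE A (Python) =====
-- from typing import Dict, List, Optional
--
-- def create_mapping_of_tabstop_positions(
--     initial_tabstop_positions: List[int],
--     current_tabstop_positions: List[int],
-- ) -> Dict[int, int]:
--     """
--     Create a mapping of the tabstop positions of the Prüfidentifikatoren columns.
--     """
--     # create a mapping of the tabstop positions
--     mapping: Dict[int, int] = {}
--     # Sort the lists in ascending order
--     initial_tabstop_positions.sort()
--     current_tabstop_positions.sort()
--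
--     # Iterate over the sorted lists and find the entries with the least difference
--     for i, current_pos in enumerate(current_tabstop_positions):
--         min_diff = float("inf")
--         min_j = None
--         for j, initial_pos in enumerate(initial_tabstop_positions):
--             diff = abs(current_pos - initial_pos)
--             if diff < min_diff:
--                 min_diff = diff
--                 min_j = j
--         if min_j is None:
--             raise ValueError("min_j should not be None")
--
--         mapping[current_tabstop_positions[i]] = initial_tabstop_positions[min_j]
--
--     return mapping
-- ===== SOURCE B (Python) =====
-- def create_mapping_of_tabstop_positions(initial_tabstop_positions, current_tabstop_positions):
--     """Merge-style sweep: sort both lists, then walk the sorted current positions with a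
--     single persistent pointer into the sorted initial positions (nearest-neighbor index
--     is monotone in the query), instead of a full inner scan per current position."""
--     initial_tabstop_positions.sort()
--     current_tabstop_positions.sort()
--     if current_tabstop_positions and not initial_tabstop_positions:
--         raise ValueError("min_j should not be None")
--     mapping = {}
--     j = 0
--     last = len(initial_tabstop_positions) - 1
--     for c in current_tabstop_positions:
--         # advance while the next initial position is strictly closer (ties keep the
--         # smaller value, as the strict minimum does) or is a duplicate of the current one
--         while j < last and (
--             abs(initial_tabstop_positions[j + 1] - c) < abs(initial_tabstop_positions[j] - c)
--             or initial_tabstop_positions[j + 1] == initial_tabstop_positions[j]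
--         ):
--             j += 1
--         mapping[c] = initial_tabstop_positions[j]
--     return mapping
-- ===== Notes on version B (the rewrite author's own statement) =====
-- stated objective: faster
-- what changed: Replaces A's full inner scan of the initial positions for every current position (running argmin with min_diff/min_j) by a merge-style sweep: one persistent pointer into the sorted initial list that only advances while the next element is strictly closer (or a duplicate), exploiting monotonicity of the nearest-neighbor index over the sorted current positions.
import Mathlib
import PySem

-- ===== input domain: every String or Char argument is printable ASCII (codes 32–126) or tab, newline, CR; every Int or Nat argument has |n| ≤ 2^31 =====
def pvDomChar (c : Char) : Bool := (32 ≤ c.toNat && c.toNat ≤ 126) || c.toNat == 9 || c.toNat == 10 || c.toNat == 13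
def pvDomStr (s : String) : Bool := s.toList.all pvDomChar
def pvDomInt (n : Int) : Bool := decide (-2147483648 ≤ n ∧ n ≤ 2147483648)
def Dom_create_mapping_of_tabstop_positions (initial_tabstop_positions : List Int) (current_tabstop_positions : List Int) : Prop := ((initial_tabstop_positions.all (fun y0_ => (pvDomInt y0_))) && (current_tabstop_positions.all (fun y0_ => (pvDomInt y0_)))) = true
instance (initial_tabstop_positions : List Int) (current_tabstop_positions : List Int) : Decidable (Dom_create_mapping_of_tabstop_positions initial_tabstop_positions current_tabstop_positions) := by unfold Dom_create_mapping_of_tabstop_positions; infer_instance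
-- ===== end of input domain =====

-- B replaces A's full inner scan per current position by a single merge-style pointer sweep
-- over both sorted lists. Both Pythons sort their list arguments IN PLACE (a caller-visible
-- mutation, identical in A and B); the equivalence proved here is about the return value.

-- ===== PORT A =====
-- inner `for j, initial_pos in enumerate(initial_tabstop_positions)` loop:
-- state is (min_diff, min_j); Python's float("inf") start value is represented by `none`
-- (exact here: `diff < inf` is always true, and min_diff is otherwise an int).
def aInner (c : Int) : List Int → Nat → Option Int × Option Nat → Option Int × Option Nat
  | [], _, st => st
  | x :: r, j, st =>
      let d := |c - x|
      let st' := match st.1 with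
        | none => (some d, some j)
        | some md => if d < md then (some d, some j) else st
      aInner c r (j+1) st'

-- outer `for i, current_pos in enumerate(current_tabstop_positions)` loop
def aLoop (si : List Int) (sc : List Int) : List Int → Nat → PySem.Dict Int Int → PySem.Dict Int Int
  | [], _, m => m
  | c :: cs, i, m =>
      let st := aInner c si 0 (none, none)
      match st.2 with
      | none => m  -- Python: `raise ValueError("min_j should not be None")`; excluded by Pre_
      | some j =>
        match sc[i]?, si[j]? with
        | some key, some v => aLoop si sc cs (i+1) (m.insert key v)
        | _, _ => aLoop si sc cs (i+1) m   -- unreachable: i and j are in range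

def create_mapping_of_tabstop_positions (initial_tabstop_positions : List Int) (current_tabstop_positions : List Int) : List (Int × Int) :=
  let si := PySem.List.sorted initial_tabstop_positions (fun x => x) false
  let sc := PySem.List.sorted current_tabstop_positions (fun x => x) false
  (aLoop si sc sc 0 PySem.Dict.empty).items

-- ===== PORT B =====
-- Source B's `while j < last and (...)` pointer advance; the pointer state is the suffix (x, r)
-- of the sorted initial list at the pointer (`j < last` = `r ≠ []`).
def bAdvance (c x : Int) : List Int → Int × List Int
  | [] => (x, [])
  | y :: r => if |y - c| < |x - c| ∨ y = x then bAdvance c y r else (x, y :: r)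

-- Source B's `for c in current_tabstop_positions` loop with the persistent pointer
def bLoop : List Int → Int → List Int → PySem.Dict Int Int → PySem.Dict Int Int
  | [], _, _, m => m
  | c :: cs, x, r, m =>
      let p := bAdvance c x r
      bLoop cs p.1 p.2 (m.insert c p.1)

def create_mapping_of_tabstop_positions_alt (initial_tabstop_positions : List Int) (current_tabstop_positions : List Int) : List (Int × Int) :=
  let si := PySem.List.sorted initial_tabstop_positions (fun x => x) false
  let sc := PySem.List.sorted current_tabstop_positions (fun x => x) false
  match si with
  | [] => []  -- Source B: raise ValueError if sc ≠ [] (excluded by Pre_); mapping stays {} if sc = []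
  | x :: r => (bLoop sc x r PySem.Dict.empty).items

-- ===== PRECONDITION & SPEC =====
-- Pre_ excludes exactly the inputs where Python A raises ValueError:
-- an empty initial list together with a non-empty current list.
def Pre_create_mapping_of_tabstop_positions (initial_tabstop_positions : List Int) (current_tabstop_positions : List Int) : Prop :=
  current_tabstop_positions ≠ [] → initial_tabstop_positions ≠ []
instance (initial_tabstop_positions : List Int) (current_tabstop_positions : List Int) : Decidable (Pre_create_mapping_of_tabstop_positions initial_tabstop_positions current_tabstop_positions) := by unfold Pre_create_mapping_of_tabstop_positions; infer_instance
def pvWitness_create_mapping_of_tabstop_positions : List Int × List Int := ([10, 0], [3, 12])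

def Spec_create_mapping_of_tabstop_positions (initial_tabstop_positions : List Int) (current_tabstop_positions : List Int) (out : List (Int × Int)) : Prop := out = create_mapping_of_tabstop_positions_alt initial_tabstop_positions current_tabstop_positions
instance (initial_tabstop_positions : List Int) (current_tabstop_positions : List Int) (out : List (Int × Int)) : Decidable (Spec_create_mapping_of_tabstop_positions initial_tabstop_positions current_tabstop_positions out) := by unfold Spec_create_mapping_of_tabstop_positions; infer_instance

-- ===== CLAIM (what is proved, stated in full; the proofs are below) =====
def Claim_equal_create_mapping_of_tabstop_positions : Prop := ∀ (initial_tabstop_positions : List Int) (current_tabstop_positions : List Int), Dom_create_mapping_of_tabstop_positions initial_tabstop_positions current_tabstop_positions → Pre_create_mapping_of_tabstop_positions initial_tabstop_positions current_tabstop_positions → Spec_create_mapping_of_tabstop_positions initial_tabstop_positions current_tabstop_positions (create_mapping_of_tabstop_positions initial_tabstop_positions current_tabstop_positions)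

-- ===== LEMMAS AND PROOFS =====

-- the value A's inner argmin loop tracks, expressed as a fold on values
def best (c b y : Int) : Int := if |c - y| < |c - b| then y else b

lemma arith_stop (x y z c : Int) (hxy : x ≤ y) (hyz : y ≤ z) (hne : y ≠ x)
    (h : ¬ |y - c| < |x - c|) : ¬ |c - z| < |c - x| := by
  simp only [Int.abs_eq_natAbs] at h ⊢; omega

lemma arith_adv (x y c c' : Int) (hxy : x ≤ y) (hcc : c ≤ c') (h : |y - c| < |x - c|) :
    |y - c'| < |x - c'| := by
  simp only [Int.abs_eq_natAbs] at h ⊢; omega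

lemma aInner_spec (c : Int) : ∀ (r l : List Int) (j jb : Nat) (b : Int),
    r = l.drop j → l[jb]? = some b →
    ∃ j', aInner c r j (some |c - b|, some jb) = (some |c - r.foldl (best c) b|, some j')
      ∧ l[j']? = some (r.foldl (best c) b) := by
  intro r
  induction r with
  | nil => intro l j jb b _ hjb; exact ⟨jb, rfl, by simpa using hjb⟩
  | cons x r2 ih =>
    intro l j jb b hdrop hjb
    have hx : l[j]? = some x := by
      have h0 : (l.drop j)[0]? = some x := by rw [← hdrop]; rfl
      simpa [List.getElem?_drop] using h0
    have hr2 : r2 = l.drop (j + 1) := by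
      have h1 : l.drop (j + 1) = (l.drop j).drop 1 := by rw [List.drop_drop]
      rw [h1, ← hdrop]; rfl
    by_cases hlt : |c - x| < |c - b|
    · have hb : best c b x = x := by simp [best, hlt]
      have := ih l (j + 1) j x hr2 hx
      simpa [aInner, hlt, List.foldl, hb] using this
    · have hb : best c b x = b := by simp [best, hlt]
      have := ih l (j + 1) jb b hr2 hjb
      simpa [aInner, hlt, List.foldl, hb] using this

lemma aInner_start (c : Int) (x : Int) (r : List Int) :
    ∃ j', aInner c (x :: r) 0 (none, none) = (some |c - r.foldl (best c) x|, some j')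
      ∧ (x :: r)[j']? = some (r.foldl (best c) x) := by
  have h1 : aInner c (x :: r) 0 (none, none) = aInner c r 1 (some |c - x|, some 0) := rfl
  rw [h1]
  exact aInner_spec c r (x :: r) 1 0 x rfl rfl

lemma foldl_best_const (c x : Int) (r : List Int) (h : ∀ z ∈ r, ¬ |c - z| < |c - x|) :
    r.foldl (best c) x = x := by
  induction r with
  | nil => rfl
  | cons z r2 ih =>
    have hz : best c x z = x := by simp [best, h z (by simp)]
    simpa [List.foldl, hz] using ih (fun w hw => h w (by simp [hw]))

lemma bAdvance_fst (c : Int) : ∀ (r : List Int) (x : Int), (x :: r).Pairwise (· ≤ ·) →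
    (bAdvance c x r).1 = r.foldl (best c) x := by
  intro r
  induction r with
  | nil => intro x _; rfl
  | cons y r2 ih =>
    intro x h
    rcases List.pairwise_cons.mp h with ⟨hxall, htl⟩
    have hxy : x ≤ y := hxall y (by simp)
    by_cases hc : |y - c| < |x - c| ∨ y = x
    · have hb : best c x y = y ∨ y = x := by
        rcases hc with hc | hc
        · left; simp [best, abs_sub_comm c y, abs_sub_comm c x, hc]
        · right; exact hc
      have hstep : List.foldl (best c) x (y :: r2) = List.foldl (best c) y r2 := by
        rcases hb with hb | hb
        · simp [List.foldl, hb]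
        · subst hb; simp [List.foldl, best]
      rw [hstep, ← ih y htl]
      simp [bAdvance, hc]
    · have hlt : ¬ |y - c| < |x - c| := fun hh => hc (Or.inl hh)
      have hne : y ≠ x := fun hh => hc (Or.inr hh)
      have hall : ∀ z ∈ y :: r2, ¬ |c - z| < |c - x| := by
        intro z hz
        have hyz : y ≤ z := by
          rcases List.mem_cons.mp hz with h1 | h1
          · omega
          · exact (List.pairwise_cons.mp htl).1 z h1
        exact arith_stop x y z c hxy hyz hne hlt
      have hfc : List.foldl (best c) x (y :: r2) = x := foldl_best_const c x (y :: r2) hall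
      rw [hfc]
      simp [bAdvance, hc]

lemma bAdvance_pairwise (c : Int) : ∀ (r : List Int) (x : Int), (x :: r).Pairwise (· ≤ ·) →
    ((bAdvance c x r).1 :: (bAdvance c x r).2).Pairwise (· ≤ ·) := by
  intro r
  induction r with
  | nil => intro x _; simp [bAdvance]
  | cons y r2 ih =>
    intro x h
    rcases List.pairwise_cons.mp h with ⟨_, htl⟩
    by_cases hc : |y - c| < |x - c| ∨ y = x
    · simpa [bAdvance, hc] using ih y htl
    · simpa [bAdvance, hc] using h

lemma bAdvance_persist (c c' : Int) (hcc : c ≤ c') : ∀ (r : List Int) (x : Int),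
    (x :: r).Pairwise (· ≤ ·) →
    bAdvance c' (bAdvance c x r).1 (bAdvance c x r).2 = bAdvance c' x r := by
  intro r
  induction r with
  | nil => intro x _; rfl
  | cons y r2 ih =>
    intro x h
    rcases List.pairwise_cons.mp h with ⟨hxall, htl⟩
    have hxy : x ≤ y := hxall y (by simp)
    by_cases hc : |y - c| < |x - c| ∨ y = x
    · have hc' : |y - c'| < |x - c'| ∨ y = x := by
        rcases hc with hc | hc
        · exact Or.inl (arith_adv x y c c' hxy hcc hc)
        · exact Or.inr hc
      simpa [bAdvance, hc, hc'] using ih y htl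
    · simp [bAdvance, hc]

lemma aLoop_nil (sc : List Int) : ∀ (cs : List Int) (i : Nat) (m : PySem.Dict Int Int),
    aLoop [] sc cs i m = m := by
  intro cs i m
  cases cs <;> simp [aLoop, aInner]

lemma loop_eq (x0 : Int) (r0 : List Int) (h0 : (x0 :: r0).Pairwise (· ≤ ·)) (sc : List Int) :
    ∀ (cs : List Int) (x : Int) (r : List Int) (m : PySem.Dict Int Int) (i : Nat),
    cs = sc.drop i → cs.Pairwise (· ≤ ·) →
    (∀ c' ∈ cs, bAdvance c' x r = bAdvance c' x0 r0) →
    (x :: r).Pairwise (· ≤ ·) →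
    aLoop (x0 :: r0) sc cs i m = bLoop cs x r m := by
  intro cs
  induction cs with
  | nil => intro x r m i _ _ _ _; rfl
  | cons cc cs2 ih =>
    intro x r m i hdrop hpw hadv hxr
    rcases aInner_start cc x0 r0 with ⟨j', hinner, hget⟩
    have hsci : sc[i]? = some cc := by
      have h0 : (sc.drop i)[0]? = some cc := by rw [← hdrop]; rfl
      simpa [List.getElem?_drop] using h0
    have hv : (bAdvance cc x r).1 = r0.foldl (best cc) x0 := by
      rw [hadv cc (by simp)]
      exact bAdvance_fst cc r0 x0 h0
    have hA : aLoop (x0 :: r0) sc (cc :: cs2) i m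
        = aLoop (x0 :: r0) sc cs2 (i + 1) (m.insert cc (r0.foldl (best cc) x0)) := by
      simp [aLoop, hinner, hsci, hget]
    have hB : bLoop (cc :: cs2) x r m
        = bLoop cs2 (bAdvance cc x r).1 (bAdvance cc x r).2
            (m.insert cc (r0.foldl (best cc) x0)) := by
      simp [bLoop, hv]
    rw [hA, hB]
    apply ih
    · have h1 : sc.drop (i + 1) = (sc.drop i).drop 1 := by rw [List.drop_drop]
      rw [h1, ← hdrop]; rfl
    · exact (List.pairwise_cons.mp hpw).2
    · intro c' hc'
      have hle : cc ≤ c' := (List.pairwise_cons.mp hpw).1 c' hc'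
      calc bAdvance c' (bAdvance cc x r).1 (bAdvance cc x r).2
          = bAdvance c' x r := bAdvance_persist cc c' hle r x hxr
        _ = bAdvance c' x0 r0 := hadv c' (by simp [hc'])
    · exact bAdvance_pairwise cc r x hxr

-- ===== VERDICT (by name: the statement is the Claim_ definition above) =====
theorem create_mapping_of_tabstop_positions_spec : Claim_equal_create_mapping_of_tabstop_positions := by
  unfold Claim_equal_create_mapping_of_tabstop_positions
  intro init cur _ _
  unfold Spec_create_mapping_of_tabstop_positions
  unfold create_mapping_of_tabstop_positions create_mapping_of_tabstop_positions_alt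
  cases hsi : PySem.List.sorted init (fun x => x) false with
  | nil => simp [aLoop_nil]; rfl
  | cons x0 r0 =>
    have hp0 : (x0 :: r0).Pairwise (· ≤ ·) := by
      have h := PySem.List.sorted_pairwise (xs := init) (key := fun x => x)
      rw [hsi] at h; exact h
    have hpc : (PySem.List.sorted cur (fun x => x) false).Pairwise (· ≤ ·) :=
      PySem.List.sorted_pairwise (xs := cur) (key := fun x => x)
    simp only []
    congr 1
    exact loop_eq x0 r0 hp0 (PySem.List.sorted cur (fun x => x) false)
      (PySem.List.sorted cur (fun x => x) false) x0 r0 PySem.Dict.empty 0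
      (by simp) hpc (fun _ _ => rfl) hp0
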